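-- pv_equiv track=rewrite | github.com/Duskamo15/UCH_DataComparerAndResultReporter | Utils/DateParser.py | breakdown
-- ===== SOURCE A (Python) =====
-- def breakdown(name):
-- 	l= [4,7,10,13,16,20]
-- 	for i in l:
-- 		if i in [4,7]:
-- 			name = name[:i] + "-" + name[i:]
-- 		if i ==10:
-- 			name = name[:i] + " " + name[i:]
-- 		if i in [13,16]:
-- 			name = name[:i] + ":" + name[i:]
-- 		if i == 20:
-- 			name = name[:i] + "." + name[i:]
-- 	return name
-- ===== SOURCE B (Python) =====
-- def breakdown(name):
-- 	return (name[:4] + "-" + name[4:6] + "-" + name[6:8] + " " + name[8:10]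
-- 		+ ":" + name[10:12] + ":" + name[12:15] + "." + name[15:])
-- ===== Notes on version B (the rewrite author's own statement) =====
-- stated objective: simpler
-- what changed: Replaces A's loop of six successive string re-insertions (with shifted indices 4,7,10,13,16,20) by one expression concatenating slices of the original string at offsets 4,6,8,10,12,15.
import Mathlib
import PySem

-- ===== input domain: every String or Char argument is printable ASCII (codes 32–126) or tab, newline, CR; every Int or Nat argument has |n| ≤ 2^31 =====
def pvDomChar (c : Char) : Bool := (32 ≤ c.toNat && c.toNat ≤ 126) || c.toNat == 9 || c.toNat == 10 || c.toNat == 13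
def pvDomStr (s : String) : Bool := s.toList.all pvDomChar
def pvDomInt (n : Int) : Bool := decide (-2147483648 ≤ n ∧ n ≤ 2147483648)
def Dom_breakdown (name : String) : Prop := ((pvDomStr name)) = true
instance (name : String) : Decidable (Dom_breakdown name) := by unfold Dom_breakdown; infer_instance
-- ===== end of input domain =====

-- B replaces A's loop of successive in-place insertions by one expression of slices of the
-- original string at the derived offsets (objective: simpler).

-- ===== PORT A =====
-- one iteration of A's 'for i in l' body, on the code-point list
def pvStepA (s : List Char) (i : Int) : List Char :=
  let s1 := if i = 4 ∨ i = 7 then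
      PySem.List.slice s none (some i) ++ ['-'] ++ PySem.List.slice s (some i) none else s
  let s2 := if i = 10 then
      PySem.List.slice s1 none (some i) ++ [' '] ++ PySem.List.slice s1 (some i) none else s1
  let s3 := if i = 13 ∨ i = 16 then
      PySem.List.slice s2 none (some i) ++ [':'] ++ PySem.List.slice s2 (some i) none else s2
  if i = 20 then
      PySem.List.slice s3 none (some i) ++ ['.'] ++ PySem.List.slice s3 (some i) none else s3

def pvCoreA (s : List Char) : List Char :=
  ([4, 7, 10, 13, 16, 20] : List Int).foldl pvStepA s

def breakdown (name : String) : String :=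
  String.ofList (pvCoreA name.toList)

-- ===== PORT B =====
def pvCoreB (s : List Char) : List Char :=
  PySem.List.slice s none (some (4:Int)) ++ ['-'] ++
  PySem.List.slice s (some (4:Int)) (some (6:Int)) ++ ['-'] ++
  PySem.List.slice s (some (6:Int)) (some (8:Int)) ++ [' '] ++
  PySem.List.slice s (some (8:Int)) (some (10:Int)) ++ [':'] ++
  PySem.List.slice s (some (10:Int)) (some (12:Int)) ++ [':'] ++
  PySem.List.slice s (some (12:Int)) (some (15:Int)) ++ ['.'] ++
  PySem.List.slice s (some (15:Int)) none

def breakdown_alt (name : String) : String :=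
  String.ofList (pvCoreB name.toList)

-- ===== PRECONDITION & SPEC =====
def Spec_breakdown (name : String) (out : String) : Prop := out = breakdown_alt name
instance (name : String) (out : String) : Decidable (Spec_breakdown name out) := by unfold Spec_breakdown; infer_instance

-- ===== CLAIM (what is proved, stated in full; the proofs are below) =====
def Claim_equal_breakdown : Prop := ∀ (name : String), Dom_breakdown name → Spec_breakdown name (breakdown name)

-- ===== LEMMAS AND PROOFS =====
-- Only the first 15 characters are split off individually; case on them and the goal computes.
set_option maxHeartbeats 1000000 in
theorem pvCore_eq (s : List Char) : pvCoreA s = pvCoreB s :=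
  match s with
  | [] => by
    simp [pvCoreA, pvCoreB, pvStepA, PySem.List.slice_to, PySem.List.slice_from,
      PySem.List.slice_toNat]
  | [a1] => by
    simp [pvCoreA, pvCoreB, pvStepA, PySem.List.slice_to, PySem.List.slice_from,
      PySem.List.slice_toNat]
  | [a1, a2] => by
    simp [pvCoreA, pvCoreB, pvStepA, PySem.List.slice_to, PySem.List.slice_from,
      PySem.List.slice_toNat]
  | [a1, a2, a3] => by
    simp [pvCoreA, pvCoreB, pvStepA, PySem.List.slice_to, PySem.List.slice_from,
      PySem.List.slice_toNat]
  | [a1, a2, a3, a4] => by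
    simp [pvCoreA, pvCoreB, pvStepA, PySem.List.slice_to, PySem.List.slice_from,
      PySem.List.slice_toNat]
  | [a1, a2, a3, a4, a5] => by
    simp [pvCoreA, pvCoreB, pvStepA, PySem.List.slice_to, PySem.List.slice_from,
      PySem.List.slice_toNat]
  | [a1, a2, a3, a4, a5, a6] => by
    simp [pvCoreA, pvCoreB, pvStepA, PySem.List.slice_to, PySem.List.slice_from,
      PySem.List.slice_toNat]
  | [a1, a2, a3, a4, a5, a6, a7] => by
    simp [pvCoreA, pvCoreB, pvStepA, PySem.List.slice_to, PySem.List.slice_from,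
      PySem.List.slice_toNat]
  | [a1, a2, a3, a4, a5, a6, a7, a8] => by
    simp [pvCoreA, pvCoreB, pvStepA, PySem.List.slice_to, PySem.List.slice_from,
      PySem.List.slice_toNat]
  | [a1, a2, a3, a4, a5, a6, a7, a8, a9] => by
    simp [pvCoreA, pvCoreB, pvStepA, PySem.List.slice_to, PySem.List.slice_from,
      PySem.List.slice_toNat]
  | [a1, a2, a3, a4, a5, a6, a7, a8, a9, a10] => by
    simp [pvCoreA, pvCoreB, pvStepA, PySem.List.slice_to, PySem.List.slice_from,
      PySem.List.slice_toNat]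
  | [a1, a2, a3, a4, a5, a6, a7, a8, a9, a10, a11] => by
    simp [pvCoreA, pvCoreB, pvStepA, PySem.List.slice_to, PySem.List.slice_from,
      PySem.List.slice_toNat]
  | [a1, a2, a3, a4, a5, a6, a7, a8, a9, a10, a11, a12] => by
    simp [pvCoreA, pvCoreB, pvStepA, PySem.List.slice_to, PySem.List.slice_from,
      PySem.List.slice_toNat]
  | [a1, a2, a3, a4, a5, a6, a7, a8, a9, a10, a11, a12, a13] => by
    simp [pvCoreA, pvCoreB, pvStepA, PySem.List.slice_to, PySem.List.slice_from,
      PySem.List.slice_toNat]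
  | [a1, a2, a3, a4, a5, a6, a7, a8, a9, a10, a11, a12, a13, a14] => by
    simp [pvCoreA, pvCoreB, pvStepA, PySem.List.slice_to, PySem.List.slice_from,
      PySem.List.slice_toNat]
  | a1::a2::a3::a4::a5::a6::a7::a8::a9::a10::a11::a12::a13::a14::a15::r => by
    simp [pvCoreA, pvCoreB, pvStepA, PySem.List.slice_to, PySem.List.slice_from,
      PySem.List.slice_toNat]

-- ===== VERDICT (by name: the statement is the Claim_ definition above) =====
theorem breakdown_spec : Claim_equal_breakdown := by
  intro name _
  unfold Spec_breakdown breakdown breakdown_alt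
  rw [pvCore_eq]
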